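-- pv_equiv track=rewrite | github.com/Paul-31415/golay-decode-using-cover | bits.py | select_bits
-- ===== SOURCE A (Python) =====
-- def bit_length(w):
--     w = abs(w)
--     b = 1
--     while w > 1<<b:
--         b <<= 1
--     b >>= 1
--     c = b
--     while c > 0:
--         if w > 1<<b<<c:
--             b |= c
--         c >>= 1
--     return b + (w >> b)
--
-- def select_bits(w,mask):
--     r = 0
--     b = 0
--     for i in range(bit_length(mask)):
--         if (mask>>i)&1:
--             r |= (w>>(i-b))&(1<<b)
--             b += 1
--     return r
-- ===== SOURCE B (Python) =====
-- def select_bits(w, mask):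
--     # truncate mask to its bit_length bits (matters for negative masks),
--     # then peel one SET bit per iteration instead of scanning every position
--     m = mask & ((1 << abs(mask).bit_length()) - 1)
--     r = 0
--     b = 0
--     while m:
--         i = (m & -m).bit_length() - 1
--         r |= ((w >> i) & 1) << b
--         b += 1
--         m &= m - 1
--     return r
-- ===== Notes on version B (the rewrite author's own statement) =====
-- stated objective: faster
-- what changed: B truncates the mask to its bit_length bits once and then peels one set bit per iteration with m&-m / m&(m-1) (and Python's built-in bit_length instead of A's hand-rolled doubling/binary-search loops), instead of A scanning every bit position in range(bit_length(mask)).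
import Mathlib
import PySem

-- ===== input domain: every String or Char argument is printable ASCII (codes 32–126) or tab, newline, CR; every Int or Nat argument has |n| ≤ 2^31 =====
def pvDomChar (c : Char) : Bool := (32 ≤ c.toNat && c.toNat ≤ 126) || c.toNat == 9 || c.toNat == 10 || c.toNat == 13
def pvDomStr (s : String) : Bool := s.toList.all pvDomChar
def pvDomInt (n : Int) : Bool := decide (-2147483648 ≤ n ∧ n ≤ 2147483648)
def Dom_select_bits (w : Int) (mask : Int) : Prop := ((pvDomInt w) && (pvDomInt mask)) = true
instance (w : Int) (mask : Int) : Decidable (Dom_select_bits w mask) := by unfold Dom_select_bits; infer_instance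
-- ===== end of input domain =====

-- B replaces A's position-by-position scan over range(bit_length(mask)) by a loop that peels
-- one SET bit of the truncated mask per iteration; the equivalence is proved for all inputs.

-- ===== PORT A =====
-- A-side helper: A's hand-written bit_length.  'while w > 1<<b: b <<= 1' is ported with
-- fuel wa+1: provably enough for EVERY input (blLoop1_spec shows the loop has always
-- exited before the fuel runs out, since b doubles while w > 2^b), so the port is exact.

def blLoop1 (w : Nat) (b : Nat) : Nat → Nat
  | 0 => b
  | fuel + 1 => if 1 <<< b < w then blLoop1 w (b <<< 1) fuel else b

def blLoop2 (w : Nat) (b : Nat) (c : Nat) : Nat :=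
  if _h : c = 0 then b
  else blLoop2 w (if (1 <<< b) <<< c < w then b ||| c else b) (c >>> 1)
  termination_by c
  decreasing_by
    have : c >>> 1 = c / 2 := Nat.shiftRight_eq_div_pow c 1 ▸ rfl
    omega

def bitLengthA (w : Int) : Int :=
  let wa := w.natAbs
  let b1 := blLoop1 wa 1 (wa + 1)
  let b2 := blLoop2 wa (b1 >>> 1) (b1 >>> 1)
  (b2 : Int) + ((wa >>> b2 : Nat) : Int)

-- the body of A's for-loop (state (r, b)); Python's 'if (mask>>i)&1:' is '≠ 0'

def bodyA (w : Int) (mask : Int) (rb : Int × Int) (i : Int) : Int × Int :=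
  if PySem.Int.band (mask >>> i.toNat) 1 ≠ 0 then
    (PySem.Int.bor rb.1 (PySem.Int.band (w >>> (i - rb.2).toNat) ((1 : Int) <<< rb.2.toNat)), rb.2 + 1)
  else rb

def select_bits (w : Int) (mask : Int) : Int :=
  ((PySem.List.pyRange 0 (bitLengthA mask) 1).foldl (bodyA w mask) (0, 0)).1


-- ===== PORT B =====
-- B-side helper: B's 'while m:' loop.  m = mask & ((1<<n)-1) is nonnegative, kept as Nat.

def peelB (w : Int) (m : Nat) (b : Nat) (r : Int) : Int :=
  if h : m = 0 then r
  else
    let i := PySem.Int.bitLength (PySem.Int.band (m : Int) (-(m : Int))) - 1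
    peelB w (m &&& (m - 1)) (b + 1) (PySem.Int.bor r ((PySem.Int.band (w >>> i) 1) <<< b))
  termination_by m
  decreasing_by exact Nat.lt_of_le_of_lt (Nat.and_le_right) (by omega)

def select_bits_alt (w : Int) (mask : Int) : Int :=
  let m := PySem.Int.band mask (((1 : Int) <<< PySem.Int.bitLength mask) - 1)
  peelB w m.toNat 0 0


-- ===== PRECONDITION & SPEC =====
def Spec_select_bits (w : Int) (mask : Int) (out : Int) : Prop := out = select_bits_alt w mask
instance (w : Int) (mask : Int) (out : Int) : Decidable (Spec_select_bits w mask out) := by unfold Spec_select_bits; infer_instance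

-- ===== CLAIM (what is proved, stated in full; the proofs are below) =====
def Claim_equal_select_bits : Prop := ∀ (w : Int) (mask : Int), Dom_select_bits w mask → Spec_select_bits w mask (select_bits w mask)

-- ===== LEMMAS AND PROOFS =====
-- Both ports are reduced to a common arithmetic core: coreM scans the truncated nonnegative
-- mask m from the low end (coreN the n low bits of the raw mask), adding bit i of w at
-- output position b whenever bit i of the mask is set.

lemma nat_and_pred_even (k : Nat) : (2 * k) &&& (2 * k - 1) = 2 * (k &&& (k - 1)) := by
  rcases Nat.eq_zero_or_pos k with hk | hk
  · simp [hk]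
  apply Nat.eq_of_testBit_eq
  intro i
  cases i with
  | zero => simp [Nat.testBit_zero, Nat.mul_mod_right]
  | succ i =>
      rw [Nat.testBit_and, Nat.testBit_add_one, Nat.testBit_add_one, Nat.testBit_add_one]
      have h1 : (2 * k) / 2 = k := by omega
      have h2 : (2 * k - 1) / 2 = k - 1 := by omega
      have h3 : (2 * (k &&& k - 1)) / 2 = k &&& (k - 1) := by omega
      rw [h1, h2, h3, Nat.testBit_and]

lemma nat_and_pred_odd (k : Nat) : (2 * k + 1) &&& (2 * k) = 2 * k := by
  apply Nat.eq_of_testBit_eq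
  intro i
  cases i with
  | zero => simp [Nat.testBit_zero]
  | succ i =>
      rw [Nat.testBit_and, Nat.testBit_add_one, Nat.testBit_add_one]
      have h1 : (2 * k + 1) / 2 = k := by omega
      have h2 : (2 * k) / 2 = k := by omega
      rw [h1, h2, Bool.and_self]

lemma int_neg_ediv_pow (M : Nat) (k : Nat) :
    (-(M : Int) - 1) / 2 ^ k = -((M / 2 ^ k : Nat) : Int) - 1 := by
  have hpos : (0 : Int) < 2 ^ k := by positivity
  have hM : M = 2 ^ k * (M / 2 ^ k) + M % 2 ^ k := (Nat.div_add_mod M (2^k)).symm ▸ by omega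
  have hlt : M % 2 ^ k < 2 ^ k := Nat.mod_lt _ (by positivity)
  have := (Int.ediv_emod_unique (a := -(M:Int) - 1) (b := 2^k)
    (q := -((M / 2 ^ k : Nat) : Int) - 1) (r := 2^k - 1 - ((M % 2^k : Nat):Int)) hpos)
  have hMc : ((M:Int)) = 2 ^ k * ((M / 2 ^ k : Nat) : Int) + ((M % 2 ^ k : Nat) : Int) := by
    exact_mod_cast hM
  exact (this.mpr ⟨by linear_combination hMc, by push_cast; omega, by push_cast; omega⟩).1

lemma int_neg_emod_pow (M : Nat) (k : Nat) :
    (-(M : Int) - 1) % 2 ^ k = 2 ^ k - 1 - ((M % 2 ^ k : Nat) : Int) := by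
  have hpos : (0 : Int) < 2 ^ k := by positivity
  have hM : M = 2 ^ k * (M / 2 ^ k) + M % 2 ^ k := (Nat.div_add_mod M (2^k)).symm ▸ by omega
  have hlt : M % 2 ^ k < 2 ^ k := Nat.mod_lt _ (by positivity)
  have := (Int.ediv_emod_unique (a := -(M:Int) - 1) (b := 2^k)
    (q := -((M / 2 ^ k : Nat) : Int) - 1) (r := 2^k - 1 - ((M % 2^k : Nat):Int)) hpos)
  have hMc : ((M:Int)) = 2 ^ k * ((M / 2 ^ k : Nat) : Int) + ((M % 2 ^ k : Nat) : Int) := by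
    exact_mod_cast hM
  exact (this.mpr ⟨by linear_combination hMc, by push_cast; omega, by push_cast; omega⟩).2

lemma int_two_pow_cast (k : Nat) : ((2:Int) ^ k) = ((2 ^ k : Nat) : Int) := by push_cast; ring

lemma band_two_pow (a : Int) (k : Nat) :
    PySem.Int.band a ((1 : Int) <<< k) = (a / 2 ^ k % 2) * 2 ^ k := by
  have hsh : ((1 : Int) <<< k) = 2 ^ k := by rw [Int.shiftLeft_eq]; ring
  have hknz : (0:Int) < 2 ^ k := by positivity
  have hkn : 0 < 2 ^ k := Nat.two_pow_pos k
  rw [hsh]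
  by_cases ha : 0 ≤ a
  · obtain ⟨A, hA⟩ : ∃ A : Nat, a = (A : Int) := ⟨a.toNat, by omega⟩
    subst hA
    rw [PySem.Int.band_of_nonneg (by positivity) (le_of_lt hknz)]
    rw [int_two_pow_cast, Int.toNat_natCast, Int.toNat_natCast, Nat.and_two_pow]
    have ht : A.testBit k = decide (A / 2 ^ k % 2 = 1) := Nat.testBit_eq_decide_div_mod_eq
    have hdiv : (A : Int) / ((2 ^ k : Nat) : Int) = ((A / 2 ^ k : Nat) : Int) := by
      norm_cast
    rw [hdiv, ht]
    have : ((A / 2 ^ k : Nat) : Int) % 2 = ((A / 2 ^ k % 2 : Nat) : Int) := by norm_cast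
    rw [this]
    by_cases h1 : A / 2 ^ k % 2 = 1
    · simp [h1]
    · have h0 : A / 2 ^ k % 2 = 0 := by omega
      simp [h0]
  · rw [not_le] at ha
    obtain ⟨M, hM⟩ : ∃ M : Nat, a = -(M : Int) - 1 := ⟨(-a-1).toNat, by omega⟩
    subst hM
    rw [show PySem.Int.band (-(M:Int) - 1) (2^k) =
        (((2:Int) ^ k).toNat - (((2:Int) ^ k).toNat &&& (-(-(M:Int) - 1) - 1).toNat) : Nat) by
      rw [PySem.Int.band]
      simp only [if_neg (by omega : ¬ (0:Int) ≤ -(M:Int) - 1), if_pos (le_of_lt hknz)]]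
    have hMt : (-(-(M:Int) - 1) - 1).toNat = M := by omega
    have ht : M.testBit k = decide (M / 2 ^ k % 2 = 1) := Nat.testBit_eq_decide_div_mod_eq
    have hmod : (-((M / 2 ^ k : Nat) : Int) - 1) % 2 = 1 - ((M / 2 ^ k % 2 : Nat) : Int) := by
      have := int_neg_emod_pow (M / 2 ^ k) 1
      simpa using this
    rw [hMt, int_neg_ediv_pow, hmod, int_two_pow_cast, Int.toNat_natCast, Nat.and_comm,
      Nat.and_two_pow, ht]
    by_cases h1 : M / 2 ^ k % 2 = 1
    · simp [h1]
    · have h0 : M / 2 ^ k % 2 = 0 := by omega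
      simp [h0]

lemma band_two_pow_sub_one (a : Int) (k : Nat) :
    PySem.Int.band a (((1 : Int) <<< k) - 1) = a % 2 ^ k := by
  have hsh : ((1 : Int) <<< k) = 2 ^ k := by rw [Int.shiftLeft_eq]; ring
  have hkn : 0 < 2 ^ k := Nat.two_pow_pos k
  have hnn : (0:Int) ≤ 2 ^ k - 1 := by rw [int_two_pow_cast]; omega
  have h2 : ((2:Int) ^ k - 1).toNat = 2 ^ k - 1 := by rw [int_two_pow_cast]; omega
  rw [hsh]
  by_cases ha : 0 ≤ a
  · obtain ⟨A, hA⟩ : ∃ A : Nat, a = (A : Int) := ⟨a.toNat, by omega⟩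
    subst hA
    rw [PySem.Int.band_of_nonneg (by positivity) hnn, h2, Int.toNat_natCast,
      Nat.and_two_pow_sub_one_eq_mod, int_two_pow_cast]
    norm_cast
  · rw [not_le] at ha
    obtain ⟨M, hM⟩ : ∃ M : Nat, a = -(M : Int) - 1 := ⟨(-a-1).toNat, by omega⟩
    subst hM
    rw [show PySem.Int.band (-(M:Int) - 1) (2^k - 1) =
        ((((2:Int) ^ k - 1).toNat - ((((2:Int) ^ k - 1)).toNat &&& (-(-(M:Int) - 1) - 1).toNat)) : Nat) by
      rw [PySem.Int.band]
      simp only [if_neg (by omega : ¬ (0:Int) ≤ -(M:Int) - 1), if_pos hnn]]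
    have hMt : (-(-(M:Int) - 1) - 1).toNat = M := by omega
    rw [hMt, h2, Nat.and_comm, Nat.and_two_pow_sub_one_eq_mod, int_neg_emod_pow,
      int_two_pow_cast]
    have hlt : M % 2 ^ k < 2 ^ k := Nat.mod_lt _ (by positivity)
    omega

lemma bor_bit (r t : Int) (b : Nat) (hr0 : 0 ≤ r) (hr : r < 2 ^ b) (ht0 : 0 ≤ t) (ht : t < 2) :
    PySem.Int.bor r (t * 2 ^ b) = r + t * 2 ^ b := by
  have htn : (0:Int) ≤ t * 2 ^ b := by positivity
  rw [PySem.Int.bor_of_nonneg hr0 htn]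
  have hb : (0:Int) < 2 ^ b := by positivity
  interval_cases t
  · simp [Int.toNat_of_nonneg hr0]
  · have h1 : ((1:Int) * 2 ^ b).toNat = 2 ^ b * 1 := by
      rw [one_mul, int_two_pow_cast, Int.toNat_natCast]; ring
    have hrt : r.toNat < 2 ^ b := by
      rw [int_two_pow_cast] at hr; omega
    rw [h1, Nat.lor_comm, ← Nat.two_pow_add_eq_or_of_lt hrt 1]
    rw [int_two_pow_cast]
    push_cast
    omega

def coreM (w : Int) (m : Nat) (b : Nat) (r : Int) : Int :=
  if m = 0 then r
  else coreM (w / 2) (m / 2) (b + m % 2) (r + (m % 2 : Nat) * (w % 2) * 2 ^ b)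
  termination_by m
  decreasing_by omega

def coreN (w : Int) (mask : Int) : Nat → Nat → Int → Int
  | 0, _, r => r
  | n + 1, b, r => coreN (w / 2) (mask / 2) n (b + (mask % 2).toNat) (r + (mask % 2) * (w % 2) * 2 ^ b)

lemma band_lowbit (m : Nat) (hm : 0 < m) :
    PySem.Int.band (m : Int) (-(m : Int)) = ((m - (m &&& (m - 1)) : Nat) : Int) := by
  rw [PySem.Int.band]
  have h1 : (0:Int) ≤ (m:Int) := by positivity
  have h2 : ¬ (0:Int) ≤ -(m:Int) := by omega
  simp only [if_pos h1, if_neg h2]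
  have h3 : (-(-(m:Int)) - 1).toNat = m - 1 := by omega
  rw [h3, Int.toNat_natCast]

lemma shiftr_succ (w : Int) (i : Nat) : w >>> (i + 1) = (w / 2) >>> i := by
  rw [Int.shiftRight_eq_div_pow, Int.shiftRight_eq_div_pow]
  rw [show (((2:Nat) ^ (i+1) : Nat) : Int) = 2 * ((2^i : Nat) : Int) by push_cast; ring]
  rw [← Int.ediv_ediv_of_nonneg (by omega : (0:Int) ≤ 2)]

lemma peelB_even (k : Nat) (w : Int) (b : Nat) (r : Int) :
    peelB w (2 * k) b r = peelB (w / 2) k b r := by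
  induction k using Nat.strong_induction_on generalizing w b r with
  | _ k IH =>
    rcases Nat.eq_zero_or_pos k with hk | hk
    · subst hk; simp [peelB]
    have hL : k &&& (k - 1) ≤ k - 1 := Nat.and_le_right
    have hand : (2 * k) &&& (2 * k - 1) = 2 * (k &&& (k - 1)) := nat_and_pred_even k
    have hlow : PySem.Int.band ((2 * k : Nat) : Int) (-((2 * k : Nat) : Int))
        = ((2 * (k - (k &&& (k - 1))) : Nat) : Int) := by
      rw [band_lowbit (2 * k) (by omega), hand]
      congr 1
      omega
    have hlowk : PySem.Int.band (k : Int) (-(k : Int)) = ((k - (k &&& (k - 1)) : Nat) : Int) :=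
      band_lowbit k hk
    have hbl : PySem.Int.bitLength ((2 * (k - (k &&& (k - 1))) : Nat) : Int)
        = PySem.Int.bitLength ((k - (k &&& (k - 1)) : Nat) : Int) + 1 := by
      rw [PySem.Int.bitLength_natCast (by omega)]
      congr 2
      omega
    rw [peelB]
    rw [dif_neg (by omega : ¬ 2 * k = 0)]
    conv_rhs => rw [peelB]
    rw [dif_neg (by omega : ¬ k = 0)]
    simp only []
    rw [hlow, hlowk, hbl, hand]
    have hLpos : 0 < k - (k &&& (k - 1)) := by omega
    have hblpos : 1 ≤ PySem.Int.bitLength ((k - (k &&& (k - 1)) : Nat) : Int) := by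
      by_contra h
      have h0 : PySem.Int.bitLength ((k - (k &&& (k - 1)) : Nat) : Int) = 0 := by omega
      have hlt := PySem.Int.lt_two_pow_bitLength ((k - (k &&& (k - 1)) : Nat) : Int)
      rw [h0] at hlt
      simp at hlt
      omega
    rw [show PySem.Int.bitLength ((k - (k &&& (k - 1)) : Nat) : Int) + 1 - 1
        = (PySem.Int.bitLength ((k - (k &&& (k - 1)) : Nat) : Int) - 1) + 1 by omega]
    rw [shiftr_succ]
    exact IH (k &&& (k - 1)) (by omega) w (b + 1) _

lemma band_one_shift (w : Int) : PySem.Int.band (w >>> (0:Nat)) 1 = w % 2 := by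
  have h0 : w >>> (0:Nat) = w := by rw [Int.shiftRight_eq_div_pow]; simp
  rw [h0, PySem.Int.band_one, PySem.Int.mod_eq_emod_of_pos (by omega)]

lemma peelB_eq_coreM (m : Nat) (w : Int) (b : Nat) (r : Int) (hr0 : 0 ≤ r) (hr : r < 2 ^ b) :
    coreM w m b r = peelB w m b r := by
  induction m using Nat.strong_induction_on generalizing w b r with
  | _ m IH =>
    rcases Nat.eq_zero_or_pos m with hm | hm
    · subst hm; rw [coreM]; simp [peelB]
    have hmod2 : (0:Int) ≤ w % 2 ∧ w % 2 < 2 := ⟨Int.emod_nonneg w (by omega), Int.emod_lt_of_pos w (by omega)⟩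
    by_cases hodd : m % 2 = 1
    · obtain ⟨j, hj⟩ : ∃ j, m = 2 * j + 1 := ⟨m / 2, by omega⟩
      have hand : m &&& (m - 1) = m - 1 := by
        subst hj
        have h := nat_and_pred_odd j
        simpa [show 2*j+1-1 = 2*j by omega] using h
      have hlow : PySem.Int.band (m:Int) (-(m:Int)) = (1 : Int) := by
        rw [band_lowbit m hm, hand, show m - (m-1) = 1 by omega, Nat.cast_one]
      rw [coreM, if_neg (by omega)]
      rw [peelB, dif_neg (by omega)]
      simp only [hlow]
      rw [show PySem.Int.bitLength (1:Int) - 1 = 0 by decide]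
      rw [band_one_shift, Int.shiftLeft_eq, bor_bit r (w % 2) b hr0 hr hmod2.1 hmod2.2]
      rw [hand, show m - 1 = 2 * (m / 2) by omega, peelB_even]
      rw [hodd, Nat.cast_one, one_mul]
      have hpb : (0:Int) < 2 ^ b := by positivity
      have hnn : 0 ≤ r + w % 2 * 2 ^ b := by nlinarith [hmod2.1, hr0, hpb]
      have hub : r + w % 2 * 2 ^ b < 2 ^ (b + 1) := by
        rw [pow_succ]; nlinarith [hmod2.2, hr, hpb]
      exact IH (m / 2) (by omega) (w / 2) (b + 1) (r + w % 2 * 2 ^ b) hnn hub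
    · have h0 : m % 2 = 0 := by omega
      rw [coreM, if_neg (by omega)]
      rw [h0, Nat.cast_zero, zero_mul, zero_mul, add_zero, add_zero]
      rw [IH (m / 2) (by omega) (w / 2) b r hr0 hr]
      rw [← peelB_even]
      congr 1
      omega

lemma shiftr_div (a : Int) (k : Nat) : a >>> k = a / 2 ^ k := by
  rw [Int.shiftRight_eq_div_pow, int_two_pow_cast]

lemma foldl_bodyA (n : Nat) (w mask : Int) (s b : Nat) (r : Int)
    (hb : b ≤ s) (hr0 : 0 ≤ r) (hr : r < 2 ^ b) :
    ((PySem.List.pyRange (s : Int) ((s : Int) + (n : Int)) 1).foldl (bodyA w mask) (r, (b : Int))).1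
      = coreN (w / 2 ^ s) (mask / 2 ^ s) n b r := by
  induction n generalizing s b r with
  | zero =>
      rw [show ((s:Int) + ((0:Nat):Int)) = (s:Int) by push_cast; ring]
      rw [PySem.List.pyRange_one_eq_nil (by omega)]
      simp [coreN]
  | succ n IH =>
      have hpb : (0:Int) < 2 ^ b := by positivity
      have hcond : PySem.Int.band (mask >>> ((s:Int)).toNat) 1 = (mask / 2 ^ s) % 2 := by
        rw [Int.toNat_natCast, shiftr_div, PySem.Int.band_one,
          PySem.Int.mod_eq_emod_of_pos (by omega)]
      have hm2 : 0 ≤ (mask / 2 ^ s) % 2 ∧ (mask / 2 ^ s) % 2 < 2 :=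
        ⟨Int.emod_nonneg _ (by omega), Int.emod_lt_of_pos _ (by omega)⟩
      have hw2 : 0 ≤ (w / 2 ^ s) % 2 ∧ (w / 2 ^ s) % 2 < 2 :=
        ⟨Int.emod_nonneg _ (by omega), Int.emod_lt_of_pos _ (by omega)⟩
      rw [PySem.List.pyRange_one_cons (by omega), List.foldl_cons]
      have hstep : ((s : Int) + 1) = ((s + 1 : Nat) : Int) := by push_cast; ring
      have hbound : (s:Int) + ((n + 1 : Nat) : Int) = ((s+1 : Nat) : Int) + ((n : Nat) : Int) := by
        push_cast; ring
      have hwdiv : (w / 2 ^ s) / 2 = w / 2 ^ (s + 1) := by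
        rw [Int.ediv_ediv_of_nonneg (by positivity), ← pow_succ]
      have hmdiv : (mask / 2 ^ s) / 2 = mask / 2 ^ (s + 1) := by
        rw [Int.ediv_ediv_of_nonneg (by positivity), ← pow_succ]
      by_cases hset : (mask / 2 ^ s) % 2 = 1
      · have hbody : bodyA w mask (r, (b:Int)) (s:Int)
            = (r + (w / 2 ^ s) % 2 * 2 ^ b, ((b + 1 : Nat) : Int)) := by
          rw [bodyA]
          rw [if_pos (by rw [hcond, hset]; omega)]
          have ht1 : ((s:Int) - (b:Int)).toNat = s - b := by omega
          have ht2 : ((b:Int)).toNat = b := by omega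
          rw [ht1, ht2, band_two_pow, shiftr_div]
          rw [Int.ediv_ediv_of_nonneg (by positivity), ← pow_add,
            show s - b + b = s by omega]
          rw [bor_bit r _ b hr0 hr hw2.1 hw2.2]
          norm_num
        rw [hbody, hbound, hstep, IH (s+1) (b+1) _ (by omega)
          (by nlinarith [hw2.1, hr0, hpb])
          (by rw [pow_succ]; nlinarith [hw2.2, hr, hpb])]
        rw [coreN]
        rw [hset, hwdiv, hmdiv]
        norm_num
      · have h0 : (mask / 2 ^ s) % 2 = 0 := by omega
        have hbody : bodyA w mask (r, (b:Int)) (s:Int) = (r, (b:Int)) := by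
          rw [bodyA, if_neg (by rw [hcond, h0]; simp)]
        rw [hbody, hbound, hstep, IH (s+1) b r (by omega) hr0 hr]
        rw [coreN]
        rw [h0, hwdiv, hmdiv]
        norm_num

lemma coreN_eq_coreM (n : Nat) (w mask : Int) (b : Nat) (r : Int) :
    coreN w mask n b r = coreM w ((mask % 2 ^ n).toNat) b r := by
  induction n generalizing w mask b r with
  | zero => rw [coreN]; rw [show mask % 2 ^ 0 = 0 by simp]; rw [coreM]; simp
  | succ n IH =>
      have hT : (0:Int) < 2 ^ n := by positivity
      have hs0 : 0 ≤ mask % 2 ^ (n+1) := Int.emod_nonneg _ (by positivity)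
      have hslt : mask % 2 ^ (n+1) < 2 ^ (n+1) := Int.emod_lt_of_pos _ (by positivity)
      have hm2 : mask % 2 ^ (n+1) % 2 = mask % 2 := Int.emod_emod_of_dvd _ ⟨2^n, by ring⟩
      have hdiv : mask % 2 ^ (n+1) / 2 = (mask / 2) % 2 ^ n := by
        have heq : mask = mask % 2 ^ (n+1) + (2 ^ n * (mask / 2 ^ (n+1))) * 2 := by
          have := Int.emod_add_mul_ediv mask (2 ^ (n+1))
          linear_combination -this + (by ring : (2:Int) ^ (n+1) * (mask / 2^(n+1)) = 2^n * (mask / 2^(n+1)) * 2)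
        have h2 : mask / 2 = mask % 2 ^ (n+1) / 2 + 2 ^ n * (mask / 2 ^ (n+1)) := by
          conv_lhs => rw [heq]
          rw [Int.add_mul_ediv_right _ _ (by omega : (2:Int) ≠ 0)]
        rw [h2, Int.add_mul_emod_self_left]
        exact (Int.emod_eq_of_lt (by omega) (by omega)).symm
      rw [coreN, IH]
      rcases Nat.eq_zero_or_pos (mask % 2 ^ (n+1)).toNat with hz | hz
      · have hsz : mask % 2 ^ (n+1) = 0 := by omega
        have hz2 : mask % 2 = 0 := by rw [← hm2, hsz]; simp
        have hzd : (mask / 2) % 2 ^ n = 0 := by rw [← hdiv, hsz]; simp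
        rw [hzd, hz2, hz]
        rw [show (0:Int).toNat = 0 from rfl]
        rw [coreM, coreM]
        conv_rhs => rw [coreM]
        simp
      · conv_rhs => rw [coreM, if_neg (by omega)]
        congr 1
        · omega
        · omega
        · have h : (((mask % 2 ^ (n+1)).toNat % 2 : Nat) : Int) = mask % 2 := by omega
          rw [h]

lemma blLoop1_spec (fuel w b : Nat) (hb : 1 ≤ b) (hfuel : w ≤ b + fuel) :
    (∃ j, blLoop1 w b fuel = b * 2 ^ j) ∧ w ≤ 2 ^ blLoop1 w b fuel ∧
      (blLoop1 w b fuel = b ∨ 2 ^ (blLoop1 w b fuel >>> 1) < w) := by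
  induction fuel generalizing b with
  | zero =>
      have hble : b ≤ 2 ^ b := Nat.le_of_lt (Nat.lt_two_pow_self)
      exact ⟨⟨0, by simp [blLoop1]⟩, by simp only [blLoop1]; omega, Or.inl rfl⟩
  | succ fuel IH =>
      rw [blLoop1]
      rw [Nat.one_shiftLeft]
      by_cases hc : 2 ^ b < w
      · rw [if_pos hc]
        have hble : b ≤ 2 ^ b := Nat.le_of_lt (Nat.lt_two_pow_self)
        have h2b : b <<< 1 = b * 2 := by simp [Nat.shiftLeft_eq]
        rw [h2b]
        obtain ⟨⟨j, hj⟩, hle, hd⟩ := IH (b * 2) (by omega) (by omega)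
        refine ⟨⟨j + 1, by rw [hj]; ring⟩, hle, ?_⟩
        rcases hd with hd | hd
        · right
          rw [hd]
          have : (b * 2) >>> 1 = b := by
            rw [Nat.shiftRight_eq_div_pow]; omega
          rw [this]
          exact hc
        · right; exact hd
      · rw [if_neg hc]
        exact ⟨⟨0, by ring⟩, by omega, Or.inl rfl⟩

lemma or_bit (k q : Nat) : (2 ^ (k + 1) * q) ||| 2 ^ k = 2 ^ (k + 1) * q + 2 ^ k :=
  (Nat.two_pow_add_eq_or_of_lt (Nat.pow_lt_pow_right (by omega) (by omega)) q).symm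

lemma blLoop2_spec (j : Nat) : ∀ (b w : Nat), 2 ^ (j + 1) ∣ b →
    (b = 0 ∨ 2 ^ b < w) → w ≤ 2 ^ (b + 2 ^ (j + 1)) →
    b ≤ blLoop2 w b (2 ^ j) ∧ (blLoop2 w b (2 ^ j) = 0 ∨ 2 ^ blLoop2 w b (2 ^ j) < w) ∧
      w ≤ 2 ^ (blLoop2 w b (2 ^ j) + 1) := by
  induction j with
  | zero =>
      intro b w hdvd hlo hhi
      obtain ⟨q, hq⟩ := hdvd
      rw [show (2:Nat) ^ 0 = 1 from rfl]
      rw [blLoop2, dif_neg (by omega : ¬ (1:Nat) = 0), show (1:Nat) >>> 1 = 0 from rfl,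
        blLoop2, dif_pos rfl, Nat.one_shiftLeft, Nat.shiftLeft_eq, ← pow_add]
      by_cases hc : 2 ^ (b + 1) < w
      · rw [if_pos hc]
        have hor : b ||| 1 = b + 1 := by
          have h := or_bit 0 q
          norm_num at h hq
          rw [hq, h]
        rw [hor]
        exact ⟨by omega, Or.inr hc, hhi⟩
      · rw [if_neg hc]
        exact ⟨le_refl b, hlo, by omega⟩
  | succ j IH =>
      intro b w hdvd hlo hhi
      obtain ⟨q, hq⟩ := hdvd
      have hsr : (2:Nat) ^ (j + 1) >>> 1 = 2 ^ j := by
        rw [Nat.shiftRight_eq_div_pow, pow_succ]; omega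
      rw [blLoop2, dif_neg (by positivity : ¬ (2:Nat) ^ (j+1) = 0), hsr,
        Nat.one_shiftLeft, Nat.shiftLeft_eq, ← pow_add]
      have hps : (2:Nat) ^ (j + 1 + 1) = 2 ^ (j + 1) * 2 := pow_succ 2 (j + 1)
      by_cases hc : 2 ^ (b + 2 ^ (j + 1)) < w
      · rw [if_pos hc]
        have hor : b ||| 2 ^ (j + 1) = b + 2 ^ (j + 1) := by rw [hq, or_bit]
        rw [hor]
        have h3 : w ≤ 2 ^ (b + 2 ^ (j + 1) + 2 ^ (j + 1)) := by
          rw [show b + 2 ^ (j + 1) + 2 ^ (j + 1) = b + 2 ^ (j + 1 + 1) by omega]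
          exact hhi
        have := IH (b + 2 ^ (j + 1)) w ⟨2 * q + 1, by rw [hq, hps]; ring⟩ (Or.inr hc) h3
        exact ⟨by omega, this.2.1, this.2.2⟩
      · rw [if_neg hc]
        exact IH b w ⟨2 * q, by rw [hq, hps]; ring⟩ hlo (by omega)

lemma bitLength_of_between (x k : Nat) (h1 : 2 ^ k ≤ x) (h2 : x < 2 ^ (k + 1)) :
    PySem.Int.bitLength (x : Int) = k + 1 := by
  have hx0 : x ≠ 0 := by have := Nat.one_le_two_pow (n := k); omega
  have ha := PySem.Int.lt_two_pow_bitLength (x : Int)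
  have hb := PySem.Int.two_pow_bitLength_le (x : Int) (by exact_mod_cast hx0)
  rw [Int.natAbs_natCast] at ha hb
  have hgt : k < PySem.Int.bitLength (x : Int) := by
    rw [← Nat.pow_lt_pow_iff_right (a := 2) (by omega)]
    omega
  have hle : PySem.Int.bitLength (x : Int) - 1 < k + 1 := by
    rw [← Nat.pow_lt_pow_iff_right (a := 2) (by omega)]
    omega
  omega

lemma bitLength_natAbs (w : Int) :
    PySem.Int.bitLength w = PySem.Int.bitLength ((w.natAbs : Nat) : Int) := by
  rcases Int.natAbs_eq w with h | h
  · conv_lhs => rw [h]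
  · conv_lhs => rw [h, PySem.Int.bitLength_neg]

lemma fin_val (res : Nat) (w : Int) (hlo : 2 ^ res < w.natAbs) (hhi : w.natAbs ≤ 2 ^ (res + 1)) :
    (res : Int) + ((w.natAbs >>> res : Nat) : Int) = (PySem.Int.bitLength w : Int) := by
  have hp : 0 < 2 ^ res := Nat.two_pow_pos res
  have hps : (2:Nat) ^ (res + 1) = 2 ^ res * 2 := pow_succ 2 res
  rw [Nat.shiftRight_eq_div_pow, bitLength_natAbs]
  by_cases heq : w.natAbs = 2 ^ (res + 1)
  · have hdiv : w.natAbs / 2 ^ res = 2 := by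
      rw [heq, hps, Nat.mul_div_cancel_left _ hp]
    have hbl : PySem.Int.bitLength ((w.natAbs : Nat) : Int) = res + 2 := by
      rw [bitLength_of_between w.natAbs (res + 1) (by omega)
        (by have := pow_succ 2 (res + 1); omega)]
    rw [hdiv, hbl]
    push_cast; ring
  · have hdiv : w.natAbs / 2 ^ res = 1 := Nat.div_eq_of_lt_le (by omega) (by omega)
    have hbl : PySem.Int.bitLength ((w.natAbs : Nat) : Int) = res + 1 :=
      bitLength_of_between w.natAbs res (by omega) (by omega)
    rw [hdiv, hbl]
    push_cast; ring

lemma bitLengthA_eq (w : Int) : bitLengthA w = (PySem.Int.bitLength w : Int) := by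
  rw [bitLengthA]
  obtain ⟨⟨j, hj⟩, hle, hd⟩ := blLoop1_spec (w.natAbs + 1) w.natAbs 1 (le_refl 1) (by omega)
  rw [one_mul] at hj
  rw [hj] at hle hd ⊢
  cases j with
  | zero =>
      rw [show (2:Nat) ^ 0 >>> 1 = 0 from rfl, blLoop2, dif_pos rfl]
      rw [bitLength_natAbs]
      have hwa : w.natAbs ≤ 2 := by simpa using hle
      rw [Nat.shiftRight_zero]
      set a := w.natAbs with ha
      interval_cases a <;> decide
  | succ j =>
      have hsr : (2:Nat) ^ (j + 1) >>> 1 = 2 ^ j := by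
        rw [Nat.shiftRight_eq_div_pow, pow_succ]; omega
      have hd2 : 2 ^ (2 ^ j) < w.natAbs := by
        rcases hd with hd | hd
        · exfalso
          have := Nat.one_lt_two_pow_iff (n := j + 1)
          omega
        · rwa [hsr] at hd
      rw [hsr, blLoop2, dif_neg (by positivity : ¬ (2:Nat) ^ j = 0)]
      simp only [Nat.or_self, ite_self]
      cases j with
      | zero =>
          rw [show (2:Nat) ^ 0 >>> 1 = 0 from rfl, blLoop2, dif_pos rfl]
          exact fin_val 1 w (by simpa using hd2) (by simpa using hle)
      | succ j =>
          have hsr2 : (2:Nat) ^ (j + 1) >>> 1 = 2 ^ j := by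
            rw [Nat.shiftRight_eq_div_pow, pow_succ]; omega
          rw [hsr2]
          have hps : (2:Nat) ^ (j + 1 + 1) = 2 ^ (j + 1) * 2 := pow_succ 2 (j + 1)
          have hpost := blLoop2_spec j (2 ^ (j + 1)) w.natAbs ⟨1, (mul_one _).symm⟩
            (Or.inr hd2)
            (by rw [show 2 ^ (j+1) + 2 ^ (j+1) = 2 ^ (j+1+1) by omega]; exact hle)
          have hres0 : 0 < blLoop2 w.natAbs (2 ^ (j + 1)) (2 ^ j) := by
            have := Nat.two_pow_pos (j + 1)
            omega
          have hgt : 2 ^ blLoop2 w.natAbs (2 ^ (j + 1)) (2 ^ j) < w.natAbs := by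
            rcases hpost.2.1 with h | h
            · omega
            · exact h
          exact fin_val _ w hgt hpost.2.2


-- assembled equality of the two ports

lemma ports_agree (w mask : Int) : select_bits w mask = select_bits_alt w mask := by
  rw [select_bits, select_bits_alt, bitLengthA_eq, band_two_pow_sub_one]
  have h := foldl_bodyA (PySem.Int.bitLength mask) w mask 0 0 0 (le_refl 0) (le_refl 0) (by norm_num)
  simp only [Nat.cast_zero, zero_add, pow_zero, Int.ediv_one] at h
  rw [h, coreN_eq_coreM]
  exact peelB_eq_coreM _ w 0 0 (le_refl 0) (by norm_num)


-- ===== VERDICT (by name: the statement is the Claim_ definition above) =====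
theorem select_bits_spec : Claim_equal_select_bits := by
  intro w mask _
  exact ports_agree w mask
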